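-- pv_equiv track=rewrite | github.com/Dancar96/-Fishing-Phishing- | src/utils/Funciones.py | char_repeat
-- ===== SOURCE A (Python) =====
-- def char_repeat(words_raw):
--     def iguales(items):
--         return all(x == items[0] for x in items) #mira si son todos los caracteres iguales
--     repeat = {'2': 0, '3': 0, '4': 0, '5': 0}
--     part = [2, 3, 4, 5]
--     for word in words_raw:
--         for char_repeat_count in part:
--             for i in range(len(word) - char_repeat_count + 1):
--                 sub_word = word[i:i + char_repeat_count]
--                 if iguales(sub_word):
--                     repeat[str(char_repeat_count)] = repeat[str(char_repeat_count)] + 1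
--     return sum(list(repeat.values()))
-- ===== SOURCE B (Python) =====
-- def char_repeat(words_raw):
--     # One reversed pass per word tracking the length of the equal-char run
--     # starting at the current position; each position starts min(run,5)-1
--     # all-equal substrings of length 2..5.
--     total = 0
--     for word in words_raw:
--         run = 0
--         prev = None
--         for ch in reversed(word):
--             run = run + 1 if ch == prev else 1
--             prev = ch
--             total += min(run, 5) - 1
--     return total
-- ===== Notes on version B (the rewrite author's own statement) =====
-- stated objective: faster
-- what changed: Replaces the four slice-and-compare passes per word plus a dict of per-length counters by one reversed pass per word that tracks the current equal-char run length and adds min(run,5)-1 per position.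
import Mathlib
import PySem

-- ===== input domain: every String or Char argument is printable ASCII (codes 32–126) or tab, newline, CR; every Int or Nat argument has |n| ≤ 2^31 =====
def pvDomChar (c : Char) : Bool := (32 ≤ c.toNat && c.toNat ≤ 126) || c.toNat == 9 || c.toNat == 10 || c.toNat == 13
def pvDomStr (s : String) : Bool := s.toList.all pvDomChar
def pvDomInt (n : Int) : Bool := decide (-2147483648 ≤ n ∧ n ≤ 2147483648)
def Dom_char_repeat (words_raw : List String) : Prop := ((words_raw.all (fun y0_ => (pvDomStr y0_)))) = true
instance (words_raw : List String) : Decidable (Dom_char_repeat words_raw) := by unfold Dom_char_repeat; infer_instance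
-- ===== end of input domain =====

-- B replaces A's four slice-and-compare passes per word (with a dict of counters)
-- by one reversed pass per word tracking the current equal-char run length (faster by a constant factor).


-- ===== PORT A =====
-- 'iguales(items)': all(x == items[0] for x in items); items[0] is never forced on an empty string
-- (the generator is empty there), so the port compares against the optional first element.
def pyAllEq (items : String) : Bool :=
  items.toList.all (fun x => some x == PySem.Str.pyGet? items 0)

def char_repeat (words_raw : List String) : Int :=
  let repeat0 : PySem.Dict String Int :=
    PySem.Dict.ofList [("2", 0), ("3", 0), ("4", 0), ("5", 0)]
  let part : List Int := [2, 3, 4, 5]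
  let rep := words_raw.foldl (fun rep word =>
    part.foldl (fun rep k =>
      (PySem.List.pyRange 0 (PySem.Str.len word - k + 1) 1).foldl (fun rep i =>
        let sub := PySem.Str.slice word (some i) (some (i + k))
        if pyAllEq sub then
          rep.insert (PySem.Int.toStr k) (rep.getD (PySem.Int.toStr k) 0 + 1)
        else rep) rep) rep) repeat0
  rep.values.sum

-- ===== PORT B =====
-- state of the inner loop: (run, prev, total)
def char_repeat_alt (words_raw : List String) : Int :=
  words_raw.foldl (fun total word =>
    ((word.toList.reverse).foldl
      (fun st ch =>
        let run' : Int := if some ch == st.2.1 then st.1 + 1 else 1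
        (run', some ch, st.2.2 + (min run' 5 - 1)))
      ((0 : Int), (none : Option Char), total)).2.2) 0

-- ===== PRECONDITION & SPEC =====
def Spec_char_repeat (words_raw : List String) (out : Int) : Prop := out = char_repeat_alt words_raw
instance (words_raw : List String) (out : Int) : Decidable (Spec_char_repeat words_raw out) := by unfold Spec_char_repeat; infer_instance

-- ===== CLAIM (what is proved, stated in full; the proofs are below) =====
def Claim_equal_char_repeat : Prop := ∀ (words_raw : List String), Dom_char_repeat words_raw → Spec_char_repeat words_raw (char_repeat words_raw)

-- ===== LEMMAS AND PROOFS =====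

-- all characters equal to the first one
def allEqB (l : List Char) : Bool := l.all (fun x => some x == l[0]?)

-- length of the maximal equal-character run starting at the head
def runF : List Char → Nat
  | [] => 0
  | [_] => 1
  | c :: d :: t => if c = d then runF (d :: t) + 1 else 1

-- number of all-equal windows of length k (grouped by start position)
def cnt (k : Nat) : List Char → Int
  | [] => 0
  | c :: t => (if k ≤ t.length + 1 ∧ allEqB ((c :: t).take k) = true then 1 else 0) + cnt k t

def cntTotal (l : List Char) : Int := cnt 2 l + cnt 3 l + cnt 4 l + cnt 5 l

theorem cnt_cons (k : Nat) (c : Char) (t : List Char) :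
    cnt k (c :: t) = (if k ≤ t.length + 1 ∧ allEqB ((c :: t).take k) = true then 1 else 0) + cnt k t := rfl

theorem runF_pos (c : Char) (t : List Char) : 1 ≤ runF (c :: t) := by
  cases t with
  | nil => simp [runF]
  | cons d t' => unfold runF; split <;> omega

-- a length-k prefix (k ≥ 1) is all-equal iff it fits inside the head run
theorem runF_le_iff (l : List Char) (k : Nat) (hk : 1 ≤ k) :
    k ≤ runF l ↔ (k ≤ l.length ∧ allEqB (l.take k) = true) := by
  induction l generalizing k with
  | nil => simp [runF]; omega
  | cons c t ih =>
    match k, hk with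
    | 1, _ =>
      have h1 : 1 ≤ runF (c :: t) := runF_pos c t
      simp [allEqB, h1]
    | (k' + 2), _ =>
      cases t with
      | nil =>
        simp [runF, allEqB]
      | cons d t' =>
        by_cases hcd : c = d
        · subst hcd
          have h2 : runF (c :: c :: t') = runF (c :: t') + 1 := by simp [runF]
          rw [h2]
          have hiff := ih (k := k' + 1) (by omega)
          constructor
          · intro h
            obtain ⟨hlen, hall⟩ := hiff.mp (by omega)
            refine ⟨by simp at hlen ⊢; omega, ?_⟩
            simp [allEqB] at hall ⊢
            exact hall
          · rintro ⟨hlen, hall⟩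
            have h4 : k' + 1 ≤ runF (c :: t') := by
              apply hiff.mpr
              refine ⟨by simp at hlen ⊢; omega, ?_⟩
              simp [allEqB] at hall ⊢
              exact hall
            omega
        · have h2 : runF (c :: d :: t') = 1 := by simp [runF, hcd]
          rw [h2]
          constructor
          · omega
          · rintro ⟨hlen, hall⟩
            exfalso
            simp [allEqB] at hall
            exact hcd hall.1.symm

theorem cnt_cons_run (k : Nat) (hk : 1 ≤ k) (c : Char) (t : List Char) :
    cnt k (c :: t) = (if k ≤ runF (c :: t) then 1 else 0) + cnt k t := by
  have h := runF_le_iff (c :: t) k hk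
  rw [cnt_cons]
  by_cases hr : k ≤ runF (c :: t)
  · obtain ⟨h1, h2⟩ := h.mp hr
    rw [if_pos hr, if_pos ⟨by simpa using h1, h2⟩]
  · rw [if_neg hr, if_neg (fun hx => hr (h.mpr ⟨by simpa using hx.1, hx.2⟩))]

theorem cntTotal_cons (c : Char) (t : List Char) :
    cntTotal (c :: t) = cntTotal t + (min ((runF (c :: t) : Int)) 5 - 1) := by
  have h2 := cnt_cons_run 2 (by omega) c t
  have h3 := cnt_cons_run 3 (by omega) c t
  have h4 := cnt_cons_run 4 (by omega) c t
  have h5 := cnt_cons_run 5 (by omega) c t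
  have hp := runF_pos c t
  unfold cntTotal
  rw [h2, h3, h4, h5]
  set r := runF (c :: t) with hr
  split_ifs <;> omega

-- ===== B side: the reversed pass computes (head run, head char, total + cntTotal) =====

theorem bword (l : List Char) (tot : Int) :
    l.foldr (fun ch st =>
        let run' : Int := if some ch == st.2.1 then st.1 + 1 else 1
        (run', some ch, st.2.2 + (min run' 5 - 1)))
      ((0 : Int), (none : Option Char), tot)
    = ((runF l : Int), l.head?, tot + cntTotal l) := by
  induction l with
  | nil => simp [runF, cntTotal, cnt]
  | cons c t ih =>
    rw [List.foldr_cons, ih]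
    have hrun : (if some c == t.head? then (runF t : Int) + 1 else 1) = (runF (c :: t) : Int) := by
      cases t with
      | nil => simp [runF]
      | cons d t' =>
        by_cases hcd : c = d
        · subst hcd; simp [runF]
        · simp [runF, hcd]
    simp only []
    rw [hrun, cntTotal_cons]
    simp [add_assoc]

theorem alt_fold (ws : List String) (tot : Int) :
    ws.foldl (fun total word =>
      ((word.toList.reverse).foldl
        (fun st ch =>
          let run' : Int := if some ch == st.2.1 then st.1 + 1 else 1
          (run', some ch, st.2.2 + (min run' 5 - 1)))
        ((0 : Int), (none : Option Char), total)).2.2) tot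
    = tot + (ws.map (fun w => cntTotal w.toList)).sum := by
  induction ws generalizing tot with
  | nil => simp
  | cons w t ih =>
    rw [List.foldl_cons, List.map_cons, List.sum_cons]
    have : ((w.toList.reverse).foldl
        (fun st ch =>
          let run' : Int := if some ch == st.2.1 then st.1 + 1 else 1
          (run', some ch, st.2.2 + (min run' 5 - 1)))
        ((0 : Int), (none : Option Char), tot)).2.2 = tot + cntTotal w.toList := by
      rw [List.foldl_reverse, bword]
    rw [this, ih]
    ring

theorem alt_eq (words_raw : List String) :
    char_repeat_alt words_raw = (words_raw.map (fun w => cntTotal w.toList)).sum := by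
  unfold char_repeat_alt
  rw [alt_fold]
  ring

-- ===== A side =====

def mkRep (a b c d : Int) : PySem.Dict String Int :=
  PySem.Dict.mk [("2", a), ("3", b), ("4", c), ("5", d)]

theorem cnt_of_gt (k : Nat) (l : List Char) (h : l.length < k) : cnt k l = 0 := by
  induction l with
  | nil => simp [cnt]
  | cons c t ih =>
    rw [cnt_cons]
    rw [ih (by simp at h; omega)]
    rw [if_neg (by simp at h; omega)]
    simp

-- the recursive window count agrees with the range-indexed count A's inner loop performs
theorem cnt_eq_countP (k : Nat) (hk : 1 ≤ k) (l : List Char) :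
    cnt k l = ((List.range (l.length + 1 - k)).countP
      (fun i => allEqB ((l.drop i).take k)) : Int) := by
  induction l with
  | nil => simp [cnt, Nat.sub_eq_zero_of_le hk]
  | cons c t ih =>
    by_cases hk : k ≤ t.length + 1
    · have hlen : (c :: t).length + 1 - k = (t.length + 1 - k) + 1 := by simp; omega
      rw [hlen, List.range_succ_eq_map]
      rw [cnt_cons]
      rw [List.countP_cons]
      simp only [List.drop_zero, List.countP_map]
      rw [ih]
      have hcong : (List.range (t.length + 1 - k)).countP
          ((fun i => allEqB (((c :: t).drop i).take k)) ∘ Nat.succ)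
          = (List.range (t.length + 1 - k)).countP (fun i => allEqB ((t.drop i).take k)) := by
        apply List.countP_congr
        intro i _
        simp [Function.comp]
      rw [hcong]
      split_ifs with h1 h2 h2
      · push_cast; ring
      · exact absurd h1.2 (by simpa using h2)
      · exact absurd ⟨hk, by simpa using h2⟩ h1
      · push_cast; ring
    · rw [cnt_of_gt k _ (by simp; omega)]
      have h0 : (c :: t).length + 1 - k = 0 := by simp; omega
      rw [h0]
      simp

theorem pyAllEq_eq (s : String) : pyAllEq s = allEqB s.toList := by
  unfold pyAllEq allEqB
  rw [show (0 : Int) = ((0 : Nat) : Int) from rfl, PySem.Str.pyGet?_natCast]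

-- the four per-key counting loops over mkRep
theorem loopK2 (L : List Nat) (p : Nat → Bool) (a b c d : Int) :
    L.foldl (fun rep i => if p i then rep.insert "2" (rep.getD "2" 0 + 1) else rep) (mkRep a b c d)
      = mkRep (a + (L.countP p : Int)) b c d := by
  induction L generalizing a with
  | nil => simp
  | cons i t ih =>
    rw [List.foldl_cons, List.countP_cons]
    by_cases hp : p i
    · rw [if_pos hp, show (mkRep a b c d).insert "2" ((mkRep a b c d).getD "2" 0 + 1) = mkRep (a + 1) b c d from rfl, ih]
      have hc : t.countP p + (if p i then 1 else 0) = t.countP p + 1 := by simp [hp]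
      rw [hc]
      congr 1
      push_cast
      ring
    · rw [if_neg hp, ih]
      simp [hp]

theorem loopK3 (L : List Nat) (p : Nat → Bool) (a b c d : Int) :
    L.foldl (fun rep i => if p i then rep.insert "3" (rep.getD "3" 0 + 1) else rep) (mkRep a b c d)
      = mkRep a (b + (L.countP p : Int)) c d := by
  induction L generalizing b with
  | nil => simp
  | cons i t ih =>
    rw [List.foldl_cons, List.countP_cons]
    by_cases hp : p i
    · rw [if_pos hp, show (mkRep a b c d).insert "3" ((mkRep a b c d).getD "3" 0 + 1) = mkRep a (b + 1) c d from rfl, ih]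
      have hc : t.countP p + (if p i then 1 else 0) = t.countP p + 1 := by simp [hp]
      rw [hc]
      congr 1
      push_cast
      ring
    · rw [if_neg hp, ih]
      simp [hp]

theorem loopK4 (L : List Nat) (p : Nat → Bool) (a b c d : Int) :
    L.foldl (fun rep i => if p i then rep.insert "4" (rep.getD "4" 0 + 1) else rep) (mkRep a b c d)
      = mkRep a b (c + (L.countP p : Int)) d := by
  induction L generalizing c with
  | nil => simp
  | cons i t ih =>
    rw [List.foldl_cons, List.countP_cons]
    by_cases hp : p i
    · rw [if_pos hp, show (mkRep a b c d).insert "4" ((mkRep a b c d).getD "4" 0 + 1) = mkRep a b (c + 1) d from rfl, ih]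
      have hc : t.countP p + (if p i then 1 else 0) = t.countP p + 1 := by simp [hp]
      rw [hc]
      congr 1
      push_cast
      ring
    · rw [if_neg hp, ih]
      simp [hp]

theorem loopK5 (L : List Nat) (p : Nat → Bool) (a b c d : Int) :
    L.foldl (fun rep i => if p i then rep.insert "5" (rep.getD "5" 0 + 1) else rep) (mkRep a b c d)
      = mkRep a b c (d + (L.countP p : Int)) := by
  induction L generalizing d with
  | nil => simp
  | cons i t ih =>
    rw [List.foldl_cons, List.countP_cons]
    by_cases hp : p i
    · rw [if_pos hp, show (mkRep a b c d).insert "5" ((mkRep a b c d).getD "5" 0 + 1) = mkRep a b c (d + 1) from rfl, ih]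
      have hc : t.countP p + (if p i then 1 else 0) = t.countP p + 1 := by simp [hp]
      rw [hc]
      congr 1
      push_cast
      ring
    · rw [if_neg hp, ih]
      simp [hp]

-- A's inner loop for a fixed window length k, as a countP over Nat indices
theorem inner_count (w : String) (k : Nat) :
    ((List.range ((PySem.Str.len w - (k : Int) + 1).toNat)).countP
      (fun (j : Nat) => pyAllEq (PySem.Str.slice w (some ((0 : Int) + (j : Int))) (some (((0 : Int) + (j : Int)) + (k : Int))))))
    = (List.range (w.toList.length + 1 - k)).countP (fun i => allEqB ((w.toList.drop i).take k)) := by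
  have hlen : (PySem.Str.len w - (k : Int) + 1).toNat = w.toList.length + 1 - k := by
    rw [PySem.Str.len_eq]; omega
  rw [hlen]
  apply List.countP_congr
  intro j _
  have hsub : (PySem.Str.slice w (some ((0 : Int) + (j : Int))) (some (((0 : Int) + (j : Int)) + (k : Int)))).toList
      = (w.toList.drop j).take k := by
    rw [PySem.Str.toList_slice, PySem.Chars.slice_eq_listSlice, zero_add, PySem.List.slice_natCast_add]
  rw [pyAllEq_eq, hsub]

theorem cnt_countP (w : String) (k : Nat) (hk : 1 ≤ k) :
    (((List.range ((PySem.Str.len w - (k : Int) + 1).toNat)).countP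
      (fun (j : Nat) => pyAllEq (PySem.Str.slice w (some ((0 : Int) + (j : Int))) (some (((0 : Int) + (j : Int)) + (k : Int)))))) : Int)
    = cnt k w.toList := by
  rw [inner_count w k, cnt_eq_countP k hk]

-- ===== VERDICT helper: the whole of A =====
theorem char_repeat_eq (words_raw : List String) :
    char_repeat words_raw = (words_raw.map (fun w => cntTotal w.toList)).sum := by
  unfold char_repeat
  simp only []
  have main : ∀ (ws : List String) (a b c d : Int),
      ws.foldl (fun rep word =>
        ([2, 3, 4, 5] : List Int).foldl (fun rep k =>
          (PySem.List.pyRange 0 (PySem.Str.len word - k + 1) 1).foldl (fun rep i =>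
            let sub := PySem.Str.slice word (some i) (some (i + k))
            if pyAllEq sub then
              rep.insert (PySem.Int.toStr k) (rep.getD (PySem.Int.toStr k) 0 + 1)
            else rep) rep) rep) (mkRep a b c d)
      = mkRep (a + (ws.map (fun w => cnt 2 w.toList)).sum)
              (b + (ws.map (fun w => cnt 3 w.toList)).sum)
              (c + (ws.map (fun w => cnt 4 w.toList)).sum)
              (d + (ws.map (fun w => cnt 5 w.toList)).sum) := by
    intro ws
    induction ws with
    | nil => intro a b c d; simp
    | cons w t ih =>
      intro a b c d
      rw [List.foldl_cons]
      have hword : ([2, 3, 4, 5] : List Int).foldl (fun rep k =>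
          (PySem.List.pyRange 0 (PySem.Str.len w - k + 1) 1).foldl (fun rep i =>
            let sub := PySem.Str.slice w (some i) (some (i + k))
            if pyAllEq sub then
              rep.insert (PySem.Int.toStr k) (rep.getD (PySem.Int.toStr k) 0 + 1)
            else rep) rep) (mkRep a b c d)
          = mkRep (a + cnt 2 w.toList) (b + cnt 3 w.toList) (c + cnt 4 w.toList) (d + cnt 5 w.toList) := by
        simp only [List.foldl_cons, List.foldl_nil]
        rw [show ((2 : Int)) = ((2 : Nat) : Int) from rfl,
            show ((3 : Int)) = ((3 : Nat) : Int) from rfl,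
            show ((4 : Int)) = ((4 : Nat) : Int) from rfl,
            show ((5 : Int)) = ((5 : Nat) : Int) from rfl]
        rw [PySem.List.pyRange_one, PySem.List.pyRange_one, PySem.List.pyRange_one, PySem.List.pyRange_one]
        simp only [List.foldl_map, Int.sub_zero]
        rw [show PySem.Int.toStr ((2 : Nat) : Int) = "2" from rfl,
            show PySem.Int.toStr ((3 : Nat) : Int) = "3" from rfl,
            show PySem.Int.toStr ((4 : Nat) : Int) = "4" from rfl,
            show PySem.Int.toStr ((5 : Nat) : Int) = "5" from rfl]
        rw [loopK2, cnt_countP w 2 (by omega)]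
        rw [loopK3, cnt_countP w 3 (by omega)]
        rw [loopK4, cnt_countP w 4 (by omega)]
        rw [loopK5, cnt_countP w 5 (by omega)]
      rw [hword, ih]
      simp only [List.map_cons, List.sum_cons, add_assoc]
  rw [show PySem.Dict.ofList [(("2" : String), (0 : Int)), ("3", 0), ("4", 0), ("5", 0)] = mkRep 0 0 0 0 from rfl]
  rw [main]
  have sums : ∀ (ws : List String),
      (ws.map (fun w => cnt 2 w.toList)).sum + (ws.map (fun w => cnt 3 w.toList)).sum
      + (ws.map (fun w => cnt 4 w.toList)).sum + (ws.map (fun w => cnt 5 w.toList)).sum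
      = (ws.map (fun w => cntTotal w.toList)).sum := by
    intro ws
    induction ws with
    | nil => simp
    | cons w t ih =>
      simp only [List.map_cons, List.sum_cons]
      rw [← ih]
      simp only [cntTotal]
      ring
  rw [show ∀ (a b c d : Int), (mkRep a b c d).values.sum = a + b + c + d from fun a b c d => by
    simp [mkRep, PySem.Dict.values]; ring]
  rw [← sums words_raw]
  ring

-- ===== VERDICT (by name: the statement is the Claim_ definition above) =====
theorem char_repeat_spec : Claim_equal_char_repeat := by
  intro words_raw _
  unfold Spec_char_repeat
  rw [char_repeat_eq, alt_eq]
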